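-- pv_equiv track=rewrite | github.com/developer-kush/advent_of_code | 2023/05.py | getMinLocationInterval
-- ===== SOURCE A (Python) =====
-- def mergeIntervals(intervals):
--     res = []
--     intervals.sort()
--     curr = intervals[0]
--     for i in range(1, len(intervals)):
--         if intervals[i][0] <= curr[1]+1: curr[1] = max(curr[1], intervals[i][1])
--         else: res.append(curr); curr = intervals[i]
--     res.append(curr)
--     return res
--
-- def getMinLocationInterval(intervals, stages):
--     def stageTransform(intervals, stage):
--         res = []
--         n = len(intervals)
--         curr = 0
--         for key, val in stage.items():
--             start, end = key
--             while curr<n and intervals[curr][1] < start: res.append(list(intervals[curr])); curr += 1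
--             while curr<n and intervals[curr][0] < start:
--                 res.append([intervals[curr][0], start-1])
--                 intervals[curr][0] = start
--             while curr<n and intervals[curr][1] <= end:
--                 res.append([intervals[curr][0]+val, intervals[curr][1]+val])
--                 curr += 1
--             while curr<n and intervals[curr][0] <= end:
--                 res.append([intervals[curr][0]+val, end+val])
--                 intervals[curr][0] = end+1
--         while curr<n: res.append(list(intervals[curr])); curr += 1
--         return res
--
--     for stage in stages:
--         intervals = mergeIntervals(stageTransform(intervals, stage))
--     return intervals[0][0]
-- ===== SOURCE B (Python) =====
-- def _split(pred, xs):
--     for i, x in enumerate(xs):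
--         if not pred(x):
--             return xs[:i], xs[i:]
--     return xs[:], []
--
-- def _transform(intervals, stage):
--     out = []
--     pend = [list(iv) for iv in intervals]
--     for (start, end), val in stage.items():
--         done, pend = _split(lambda iv: iv[1] < start, pend)
--         out += done
--         if pend and pend[0][0] < start:
--             out.append([pend[0][0], start - 1])
--             pend[0] = [start] + pend[0][1:]
--         moved, pend = _split(lambda iv: iv[1] <= end, pend)
--         out += [[iv[0] + val, iv[1] + val] for iv in moved]
--         if pend and pend[0][0] <= end:
--             out.append([pend[0][0] + val, end + val])
--             pend[0] = [end + 1] + pend[0][1:]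
--     return out + pend
--
-- def _merge(pieces):
--     pieces = sorted(pieces)
--     merged = [pieces[0]]
--     for nxt in pieces[1:]:
--         if nxt[0] <= merged[-1][1] + 1:
--             merged[-1][1] = max(merged[-1][1], nxt[1])
--         else:
--             merged.append(nxt)
--     return merged
--
-- def getMinLocationInterval(intervals, stages):
--     for stage in stages:
--         intervals = _merge(_transform(intervals, stage))
--     return intervals[0][0]
-- ===== Notes on version B (the rewrite author's own statement) =====
-- stated objective: alternative
-- what changed: stageTransform's four nested while loops sweeping an index and mutating the interval list in place are replaced by pure prefix/rest splitting of a pending list (two splits plus two single ifs per range, since A's mutating whiles can fire at most once), and mergeIntervals' separate (res, curr) accumulator pair by the idiomatic stack merge that updates the stack's last element; B never mutates the caller's lists (A mutates the caller's sublists during the first stage - return values are identical).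
-- outside the precondition, e.g. on getMinLocationInterval([[18]], [{}]): A returns 18, B returns 18; on getMinLocationInterval([[-9, -7], [4]], [{}, {}]): A returns -9, B returns -9
import Mathlib
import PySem

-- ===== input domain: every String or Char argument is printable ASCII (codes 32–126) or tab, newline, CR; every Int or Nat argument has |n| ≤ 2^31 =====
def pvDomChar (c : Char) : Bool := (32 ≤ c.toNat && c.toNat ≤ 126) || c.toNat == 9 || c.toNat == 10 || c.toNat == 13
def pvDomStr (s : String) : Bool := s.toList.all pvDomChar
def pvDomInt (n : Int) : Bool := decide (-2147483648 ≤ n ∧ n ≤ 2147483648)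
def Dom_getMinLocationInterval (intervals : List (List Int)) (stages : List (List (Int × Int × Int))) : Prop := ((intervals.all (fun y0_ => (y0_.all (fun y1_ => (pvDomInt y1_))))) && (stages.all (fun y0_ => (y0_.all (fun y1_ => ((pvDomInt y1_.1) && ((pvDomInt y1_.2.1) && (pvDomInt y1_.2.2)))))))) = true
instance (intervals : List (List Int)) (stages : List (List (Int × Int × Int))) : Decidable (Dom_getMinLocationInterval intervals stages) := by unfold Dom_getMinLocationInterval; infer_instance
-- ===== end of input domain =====

-- B replaces A's index-sweep (four nested while loops advancing a cursor and mutating the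
-- interval list in place) by pure prefix/rest splitting of a pending list, and A's
-- separate (res, curr) merge accumulator by the idiomatic last-element-of-stack merge.
-- Return-value equivalence only: A mutates the caller's interval sublists during the
-- first stage (and sorts its internal lists in place); B never mutates its arguments.

-- ===== PORT A =====
-- Python raises IndexError on out-of-range reads; every read below is in range on
-- Pre_-admitted inputs, so the `getD`/`pyGetD` defaults are never hit there.
-- `while curr<n and intervals[curr][1] < start: res.append(list(intervals[curr])); curr += 1`
def pvPh1 (ivs : List (List Int)) (curr : Nat) (res : List (List Int)) (s : Int) :
    Nat × List (List Int) :=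
  if h : curr < ivs.length ∧ (ivs.getD curr []).getD 1 0 < s then
    pvPh1 ivs (curr + 1) (res ++ [ivs.getD curr []]) s
  else (curr, res)
termination_by ivs.length - curr
decreasing_by omega

-- `while curr<n and intervals[curr][0] < start: res.append([intervals[curr][0], start-1]); intervals[curr][0] = start`
-- (the `≠ []` conjunct is a totality guard: Python's condition itself raises there)
def pvPh2 (ivs : List (List Int)) (curr : Nat) (res : List (List Int)) (s : Int) :
    List (List Int) × List (List Int) :=
  if h : curr < ivs.length ∧ ivs.getD curr [] ≠ [] ∧ (ivs.getD curr []).getD 0 0 < s then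
    pvPh2 (ivs.set curr ((ivs.getD curr []).set 0 s))
      curr (res ++ [[(ivs.getD curr []).getD 0 0, s - 1]]) s
  else (ivs, res)
termination_by (if curr < ivs.length ∧ ivs.getD curr [] ≠ [] ∧ (ivs.getD curr []).getD 0 0 < s then 1 else 0 : Nat)
decreasing_by
  rcases h with ⟨h1, h2, h3⟩
  have hset : (ivs.set curr ((ivs.getD curr []).set 0 s)).getD curr [] = (ivs.getD curr []).set 0 s := by
    simp [List.getD_eq_getElem?_getD, List.getElem?_set_self h1]
  have hnew : ((ivs.set curr ((ivs.getD curr []).set 0 s)).getD curr []).getD 0 0 = s := by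
    rw [hset]
    rcases hc : ivs.getD curr [] with _ | ⟨a, t⟩
    · exact absurd hc h2
    · simp [List.set]
  have hnc : ¬(curr < (ivs.set curr ((ivs.getD curr []).set 0 s)).length ∧
      (ivs.set curr ((ivs.getD curr []).set 0 s)).getD curr [] ≠ [] ∧
      ((ivs.set curr ((ivs.getD curr []).set 0 s)).getD curr []).getD 0 0 < s) := by
    rintro ⟨-, -, hlt⟩
    rw [hnew] at hlt
    exact lt_irrefl _ hlt
  rw [if_neg hnc, if_pos ⟨h1, h2, h3⟩]
  decide

-- `while curr<n and intervals[curr][1] <= end: res.append([intervals[curr][0]+val, intervals[curr][1]+val]); curr += 1`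
def pvPh3 (ivs : List (List Int)) (curr : Nat) (res : List (List Int)) (e v : Int) :
    Nat × List (List Int) :=
  if h : curr < ivs.length ∧ (ivs.getD curr []).getD 1 0 ≤ e then
    pvPh3 ivs (curr + 1)
      (res ++ [[(ivs.getD curr []).getD 0 0 + v, (ivs.getD curr []).getD 1 0 + v]]) e v
  else (curr, res)
termination_by ivs.length - curr
decreasing_by omega

-- `while curr<n and intervals[curr][0] <= end: res.append([intervals[curr][0]+val, end+val]); intervals[curr][0] = end+1`
def pvPh4 (ivs : List (List Int)) (curr : Nat) (res : List (List Int)) (e v : Int) :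
    List (List Int) × List (List Int) :=
  if h : curr < ivs.length ∧ ivs.getD curr [] ≠ [] ∧ (ivs.getD curr []).getD 0 0 ≤ e then
    pvPh4 (ivs.set curr ((ivs.getD curr []).set 0 (e + 1)))
      curr (res ++ [[(ivs.getD curr []).getD 0 0 + v, e + v]]) e v
  else (ivs, res)
termination_by (if curr < ivs.length ∧ ivs.getD curr [] ≠ [] ∧ (ivs.getD curr []).getD 0 0 ≤ e then 1 else 0 : Nat)
decreasing_by
  rcases h with ⟨h1, h2, h3⟩
  have hset : (ivs.set curr ((ivs.getD curr []).set 0 (e + 1))).getD curr [] = (ivs.getD curr []).set 0 (e + 1) := by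
    simp [List.getD_eq_getElem?_getD, List.getElem?_set_self h1]
  have hnew : ((ivs.set curr ((ivs.getD curr []).set 0 (e + 1))).getD curr []).getD 0 0 = e + 1 := by
    rw [hset]
    rcases hc : ivs.getD curr [] with _ | ⟨a, t⟩
    · exact absurd hc h2
    · simp [List.set]
  have hnc : ¬(curr < (ivs.set curr ((ivs.getD curr []).set 0 (e + 1))).length ∧
      (ivs.set curr ((ivs.getD curr []).set 0 (e + 1))).getD curr [] ≠ [] ∧
      ((ivs.set curr ((ivs.getD curr []).set 0 (e + 1))).getD curr []).getD 0 0 ≤ e) := by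
    rintro ⟨-, -, hle⟩
    rw [hnew] at hle
    omega
  rw [if_neg hnc, if_pos ⟨h1, h2, h3⟩]
  decide

-- trailing `while curr<n: res.append(list(intervals[curr])); curr += 1`
def pvLeft (ivs : List (List Int)) (curr : Nat) (res : List (List Int)) : List (List Int) :=
  if h : curr < ivs.length then pvLeft ivs (curr + 1) (res ++ [ivs.getD curr []]) else res
termination_by ivs.length - curr
decreasing_by omega

-- body of `for key, val in stage.items():`
def pvStepA (st : List (List Int) × Nat × List (List Int)) (r : Int × Int × Int) :
    List (List Int) × Nat × List (List Int) :=
  let (ivs, curr, res) := st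
  let (s, e, v) := r
  let (curr, res) := pvPh1 ivs curr res s
  let (ivs, res) := pvPh2 ivs curr res s
  let (curr, res) := pvPh3 ivs curr res e v
  let (ivs, res) := pvPh4 ivs curr res e v
  (ivs, curr, res)

-- `def stageTransform(intervals, stage): ...`
def pvStageA (ivs : List (List Int)) (stage : List (Int × Int × Int)) : List (List Int) :=
  let st := stage.foldl pvStepA (ivs, 0, [])
  pvLeft st.1 st.2.1 st.2.2

-- `def mergeIntervals(intervals): ...` (sort, then `for i in range(1, len(intervals))`)
-- loop body of mergeIntervals: `if intervals[i][0] <= curr[1]+1: curr[1] = max(...) else: ...`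
def pvMergeStepA (st : List (List Int) × List Int) (nxt : List Int) :
    List (List Int) × List Int :=
  let (res, curr) := st
  if nxt.getD 0 0 ≤ curr.getD 1 0 + 1 then
    (res, curr.set 1 (max (curr.getD 1 0) (nxt.getD 1 0)))
  else (res ++ [curr], nxt)

def pvMergeA (xs : List (List Int)) : List (List Int) :=
  let sl := PySem.List.sorted xs (fun x => x) false
  let st := (PySem.List.pyRange 1 (PySem.List.len sl)).foldl
    (fun st i => pvMergeStepA st (PySem.List.pyGetD sl i []))
    ([], sl.getD 0 [])
  st.1 ++ [st.2]

def getMinLocationInterval (intervals : List (List Int)) (stages : List (List (Int × Int × Int))) : Int :=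
  let ivs := stages.foldl (fun ivs stage => pvMergeA (pvStageA ivs stage)) intervals
  (ivs.getD 0 []).getD 0 0

-- ===== PORT B =====
-- `_split(pred, xs)` of Source B: longest prefix satisfying pred, and the rest
def pvSplit (p : List Int → Bool) : List (List Int) → List (List Int) × List (List Int)
  | [] => ([], [])
  | x :: xs =>
    if p x then
      let (pre, rest) := pvSplit p xs
      (x :: pre, rest)
    else ([], x :: xs)

-- body of Source B's `for (start, end), val in stage.items():`
def pvStepB (st : List (List Int) × List (List Int)) (r : Int × Int × Int) :
    List (List Int) × List (List Int) :=
  let (out, pend) := st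
  let (s, e, v) := r
  let (done, pend) := pvSplit (fun iv => decide (iv.getD 1 0 < s)) pend
  let out := out ++ done
  let (out, pend) :=
    match pend with
    | iv :: rest =>
      if iv.getD 0 0 < s then (out ++ [[iv.getD 0 0, s - 1]], ([s] ++ iv.drop 1) :: rest)
      else (out, iv :: rest)
    | [] => (out, [])
  let (moved, pend) := pvSplit (fun iv => decide (iv.getD 1 0 ≤ e)) pend
  let out := out ++ moved.map (fun iv => [iv.getD 0 0 + v, iv.getD 1 0 + v])
  let (out, pend) :=
    match pend with
    | iv :: rest =>
      if iv.getD 0 0 ≤ e then (out ++ [[iv.getD 0 0 + v, e + v]], ([e + 1] ++ iv.drop 1) :: rest)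
      else (out, iv :: rest)
    | [] => (out, [])
  (out, pend)

-- `_transform(intervals, stage)` of Source B
def pvTransformB (ivs : List (List Int)) (stage : List (Int × Int × Int)) : List (List Int) :=
  let st := stage.foldl pvStepB ([], ivs)
  st.1 ++ st.2

-- `_merge(pieces)` of Source B: stack whose last element absorbs overlapping successors
-- (Source B raises on an empty list — excluded by Pre_; the [] branch is a totality guard)
-- loop body of Source B's _merge: the stack's last element absorbs an overlapping successor
def pvMergeStepB (merged : List (List Int)) (nxt : List Int) : List (List Int) :=
  let last := merged.getLastD []
  if nxt.getD 0 0 ≤ last.getD 1 0 + 1 then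
    merged.dropLast ++ [last.set 1 (max (last.getD 1 0) (nxt.getD 1 0))]
  else merged ++ [nxt]

def pvMergeB (xs : List (List Int)) : List (List Int) :=
  match PySem.List.sorted xs (fun x => x) false with
  | [] => []
  | h :: t => t.foldl pvMergeStepB [h]

def getMinLocationInterval_alt (intervals : List (List Int)) (stages : List (List (Int × Int × Int))) : Int :=
  let ivs := stages.foldl (fun ivs stage => pvMergeB (pvTransformB ivs stage)) intervals
  (ivs.getD 0 []).getD 0 0



-- ===== PRECONDITION & SPEC =====
-- Pre_ admits nonempty interval lists whose sublists all have length ≥ 2 (plus the trivial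
-- no-stage case, where only intervals[0][0] is read); on sublists shorter than 2 A raises
-- IndexError on almost every input, and the rare degenerate inputs where such a short
-- sublist escapes every index read (e.g. only empty stage dicts) are excluded with them.
def Pre_getMinLocationInterval (intervals : List (List Int)) (stages : List (List (Int × Int × Int))) : Prop :=
  (intervals ≠ [] ∧ ∀ iv ∈ intervals, 2 ≤ iv.length) ∨ (stages = [] ∧ intervals.getD 0 [] ≠ [])
instance (intervals : List (List Int)) (stages : List (List (Int × Int × Int))) : Decidable (Pre_getMinLocationInterval intervals stages) := by unfold Pre_getMinLocationInterval; infer_instance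

def pvWitness_getMinLocationInterval : List (List Int) × (List (List (Int × Int × Int))) :=
  ([[1, 3], [5, 6]], [[(2, 4, 10)]])

def Spec_getMinLocationInterval (intervals : List (List Int)) (stages : List (List (Int × Int × Int))) (out : Int) : Prop := out = getMinLocationInterval_alt intervals stages
instance (intervals : List (List Int)) (stages : List (List (Int × Int × Int))) (out : Int) : Decidable (Spec_getMinLocationInterval intervals stages out) := by unfold Spec_getMinLocationInterval; infer_instance

-- ===== CLAIM (what is proved, stated in full; the proofs are below) =====
def Claim_equal_getMinLocationInterval : Prop := ∀ (intervals : List (List Int)) (stages : List (List (Int × Int × Int))), Dom_getMinLocationInterval intervals stages → Pre_getMinLocationInterval intervals stages → Spec_getMinLocationInterval intervals stages (getMinLocationInterval intervals stages)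

-- ===== LEMMAS AND PROOFS =====

theorem pvSplit_eq (p : List Int → Bool) (l : List (List Int)) :
    pvSplit p l = (l.takeWhile p, l.dropWhile p) := by
  induction l with
  | nil => simp [pvSplit]
  | cons x xs ih =>
    by_cases h : p x <;> simp [pvSplit, h, ih]

def pvInv (l : List (List Int)) : Prop := ∀ iv ∈ l, 2 ≤ iv.length

theorem pvDrop_takeWhile (p : List Int → Bool) (l : List (List Int)) :
    l.drop (l.takeWhile p).length = l.dropWhile p := by
  induction l with
  | nil => simp
  | cons x xs ih => by_cases h : p x <;> simp [h, ih]

theorem pvGetD_eq (ivs : List (List Int)) (curr : Nat) (h1 : curr < ivs.length) :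
    ivs[curr]'h1 = ivs.getD curr [] := by
  simp [List.getD_eq_getElem?_getD, List.getElem?_eq_getElem h1]

theorem pvPh1_eq (ivs : List (List Int)) (curr : Nat) (res : List (List Int)) (s : Int) :
    pvPh1 ivs curr res s =
      (curr + ((ivs.drop curr).takeWhile (fun iv => decide (iv.getD 1 0 < s))).length,
       res ++ (ivs.drop curr).takeWhile (fun iv => decide (iv.getD 1 0 < s))) := by
  fun_induction pvPh1 ivs curr res s with
  | case1 curr res h ih =>
    obtain ⟨h1, h2⟩ := h
    rw [ih, List.drop_eq_getElem_cons h1, pvGetD_eq ivs curr h1, List.takeWhile_cons]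
    rw [if_pos (by simpa using h2)]
    simp only [Prod.mk.injEq, List.length_cons]
    exact ⟨by omega, by simp⟩
  | case2 curr res h =>
    rcases Nat.lt_or_ge curr ivs.length with h1 | h1
    · have h2 : ¬ (ivs.getD curr []).getD 1 0 < s := fun hh => h ⟨h1, hh⟩
      rw [List.drop_eq_getElem_cons h1, pvGetD_eq ivs curr h1, List.takeWhile_cons]
      rw [if_neg (by simpa using h2)]
      simp
    · simp [List.drop_eq_nil_of_le h1]

theorem pvPh3_eq (ivs : List (List Int)) (curr : Nat) (res : List (List Int)) (e v : Int) :
    pvPh3 ivs curr res e v =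
      (curr + ((ivs.drop curr).takeWhile (fun iv => decide (iv.getD 1 0 ≤ e))).length,
       res ++ ((ivs.drop curr).takeWhile (fun iv => decide (iv.getD 1 0 ≤ e))).map
         (fun iv => [iv.getD 0 0 + v, iv.getD 1 0 + v])) := by
  fun_induction pvPh3 ivs curr res e v with
  | case1 curr res h ih =>
    obtain ⟨h1, h2⟩ := h
    rw [ih, List.drop_eq_getElem_cons h1, pvGetD_eq ivs curr h1, List.takeWhile_cons]
    rw [if_pos (by simpa using h2)]
    simp only [Prod.mk.injEq, List.length_cons, List.map_cons]
    exact ⟨by omega, by simp⟩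
  | case2 curr res h =>
    rcases Nat.lt_or_ge curr ivs.length with h1 | h1
    · have h2 : ¬ (ivs.getD curr []).getD 1 0 ≤ e := fun hh => h ⟨h1, hh⟩
      rw [List.drop_eq_getElem_cons h1, pvGetD_eq ivs curr h1, List.takeWhile_cons]
      rw [if_neg (by simpa using h2)]
      simp
    · simp [List.drop_eq_nil_of_le h1]

theorem pvLeft_eq (ivs : List (List Int)) (curr : Nat) (res : List (List Int)) :
    pvLeft ivs curr res = res ++ ivs.drop curr := by
  fun_induction pvLeft ivs curr res with
  | case1 curr res h ih =>
    rw [ih, List.drop_eq_getElem_cons h, pvGetD_eq ivs curr h]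
    simp
  | case2 curr res h =>
    simp [List.drop_eq_nil_of_le (by omega : ivs.length ≤ curr)]

theorem pvGetD_set (ivs : List (List Int)) (curr : Nat) (x : List Int) (h1 : curr < ivs.length) :
    (ivs.set curr x).getD curr [] = x := by
  simp [List.getD_eq_getElem?_getD, List.getElem?_set_self h1]

theorem pvHead_drop (ivs : List (List Int)) (curr : Nat) (iv : List Int) (rest : List (List Int))
    (hd : ivs.drop curr = iv :: rest) : curr < ivs.length ∧ ivs.getD curr [] = iv := by
  have h1 : curr < ivs.length := by
    by_contra hh
    rw [List.drop_eq_nil_of_le (by omega)] at hd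
    simp at hd
  refine ⟨h1, ?_⟩
  rw [List.drop_eq_getElem_cons h1] at hd
  obtain ⟨hh, -⟩ := List.cons.inj hd
  rw [← hh, pvGetD_eq]

theorem pvPh2_eq (ivs : List (List Int)) (curr : Nat) (res : List (List Int)) (s : Int)
    (iv : List Int) (rest : List (List Int)) (hd : ivs.drop curr = iv :: rest) (hiv : iv ≠ []) :
    pvPh2 ivs curr res s =
      if iv.getD 0 0 < s then
        (ivs.set curr ([s] ++ iv.drop 1), res ++ [[iv.getD 0 0, s - 1]])
      else (ivs, res) := by
  obtain ⟨h1, hgd⟩ := pvHead_drop ivs curr iv rest hd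
  obtain ⟨a, t, rfl⟩ : ∃ a t, iv = a :: t := by
    cases iv with
    | nil => exact absurd rfl hiv
    | cons a t => exact ⟨a, t, rfl⟩
  rw [pvPh2, hgd]
  by_cases hlt : (a :: t).getD 0 0 < s
  · rw [dif_pos ⟨h1, List.cons_ne_nil a t, hlt⟩, List.set_cons_zero]
    rw [pvPh2, pvGetD_set ivs curr (s :: t) h1]
    rw [dif_neg (by simp [List.getD])]
    rw [if_pos hlt]
    simp
  · rw [dif_neg (by tauto), if_neg hlt]

theorem pvPh2_nil (ivs : List (List Int)) (curr : Nat) (res : List (List Int)) (s : Int)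
    (hd : ivs.drop curr = []) : pvPh2 ivs curr res s = (ivs, res) := by
  have h1 : ivs.length ≤ curr := by
    by_contra hh
    rw [List.drop_eq_getElem_cons (by omega)] at hd
    simp at hd
    omega
  rw [pvPh2, dif_neg (by omega)]

theorem pvPh4_eq (ivs : List (List Int)) (curr : Nat) (res : List (List Int)) (e v : Int)
    (iv : List Int) (rest : List (List Int)) (hd : ivs.drop curr = iv :: rest) (hiv : iv ≠ []) :
    pvPh4 ivs curr res e v =
      if iv.getD 0 0 ≤ e then
        (ivs.set curr ([e + 1] ++ iv.drop 1), res ++ [[iv.getD 0 0 + v, e + v]])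
      else (ivs, res) := by
  obtain ⟨h1, hgd⟩ := pvHead_drop ivs curr iv rest hd
  obtain ⟨a, t, rfl⟩ : ∃ a t, iv = a :: t := by
    cases iv with
    | nil => exact absurd rfl hiv
    | cons a t => exact ⟨a, t, rfl⟩
  rw [pvPh4, hgd]
  by_cases hle : (a :: t).getD 0 0 ≤ e
  · rw [dif_pos ⟨h1, List.cons_ne_nil a t, hle⟩, List.set_cons_zero]
    rw [pvPh4, pvGetD_set ivs curr ((e + 1) :: t) h1]
    rw [dif_neg (by simp [List.getD])]
    rw [if_pos hle]
    simp
  · rw [dif_neg (by tauto), if_neg hle]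

theorem pvPh4_nil (ivs : List (List Int)) (curr : Nat) (res : List (List Int)) (e v : Int)
    (hd : ivs.drop curr = []) : pvPh4 ivs curr res e v = (ivs, res) := by
  have h1 : ivs.length ≤ curr := by
    by_contra hh
    rw [List.drop_eq_getElem_cons (by omega)] at hd
    simp at hd
    omega
  rw [pvPh4, dif_neg (by omega)]

theorem pvMem_dropWhile (p : List Int → Bool) (l : List (List Int)) (x : List Int)
    (h : x ∈ l.dropWhile p) : x ∈ l :=
  (List.dropWhile_sublist p).mem h

theorem pvDrop_set (l : List (List Int)) (n : Nat) (x : List Int) (h : n < l.length) :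
    (l.set n x).drop n = x :: l.drop (n + 1) := by
  rw [List.drop_eq_getElem_cons (by simpa using h)]
  rw [List.getElem_set_self, List.drop_set_of_lt (by omega)]

theorem pvDrop_after (ivs : List (List Int)) (curr : Nat) (p : List Int → Bool) :
    ivs.drop (curr + ((ivs.drop curr).takeWhile p).length) = (ivs.drop curr).dropWhile p := by
  rw [← List.drop_drop, pvDrop_takeWhile]

-- proof-side decompositions of the two step functions into their two halves
def pvA12 (ivs : List (List Int)) (curr : Nat) (res : List (List Int)) (s : Int) :
    List (List Int) × Nat × List (List Int) :=
  let (c1, r1) := pvPh1 ivs curr res s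
  let (i2, r2) := pvPh2 ivs c1 r1 s
  (i2, c1, r2)

def pvA34 (ivs : List (List Int)) (c : Nat) (r : List (List Int)) (e v : Int) :
    List (List Int) × Nat × List (List Int) :=
  let (c3, r3) := pvPh3 ivs c r e v
  let (i4, r4) := pvPh4 ivs c3 r3 e v
  (i4, c3, r4)

def pvB12 (st : List (List Int) × List (List Int)) (s : Int) :
    List (List Int) × List (List Int) :=
  let (out, pend) := st
  let (done, pend) := pvSplit (fun iv => decide (iv.getD 1 0 < s)) pend
  let out := out ++ done
  match pend with
  | iv :: rest =>
    if iv.getD 0 0 < s then (out ++ [[iv.getD 0 0, s - 1]], ([s] ++ iv.drop 1) :: rest)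
    else (out, iv :: rest)
  | [] => (out, [])

def pvB34 (st : List (List Int) × List (List Int)) (e v : Int) :
    List (List Int) × List (List Int) :=
  let (out, pend) := st
  let (moved, pend) := pvSplit (fun iv => decide (iv.getD 1 0 ≤ e)) pend
  let out := out ++ moved.map (fun iv => [iv.getD 0 0 + v, iv.getD 1 0 + v])
  match pend with
  | iv :: rest =>
    if iv.getD 0 0 ≤ e then (out ++ [[iv.getD 0 0 + v, e + v]], ([e + 1] ++ iv.drop 1) :: rest)
    else (out, iv :: rest)
  | [] => (out, [])

theorem pvInv_append {a b : List (List Int)} (ha : pvInv a) (hb : pvInv b) : pvInv (a ++ b) := by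
  intro y hy
  rcases List.mem_append.mp hy with hy | hy
  · exact ha y hy
  · exact hb y hy

theorem pvMem_takeWhile (p : List Int → Bool) (l : List (List Int)) (x : List Int)
    (h : x ∈ l.takeWhile p) : x ∈ l :=
  (List.takeWhile_sublist p).mem h

theorem pvInv_takeWhile (ivs : List (List Int)) (c : Nat) (p : List Int → Bool)
    (hinv : pvInv ivs) : pvInv ((ivs.drop c).takeWhile p) :=
  fun y hy => hinv y (List.drop_subset _ _ (pvMem_takeWhile _ _ _ hy))

theorem pvStepA_decomp (ivs : List (List Int)) (curr : Nat) (res : List (List Int)) (s e v : Int) :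
    pvStepA (ivs, curr, res) (s, e, v) =
      pvA34 (pvA12 ivs curr res s).1 (pvA12 ivs curr res s).2.1 (pvA12 ivs curr res s).2.2 e v := rfl

theorem pvStepB_decomp (st : List (List Int) × List (List Int)) (s e v : Int) :
    pvStepB st (s, e, v) = pvB34 (pvB12 st s) e v := rfl

theorem pv12_sim (ivs : List (List Int)) (curr : Nat) (res : List (List Int)) (s : Int)
    (hinv : pvInv ivs) :
    pvB12 (res, ivs.drop curr) s =
      ((pvA12 ivs curr res s).2.2, (pvA12 ivs curr res s).1.drop (pvA12 ivs curr res s).2.1) ∧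
    pvInv (pvA12 ivs curr res s).1 ∧ (pvInv res → pvInv (pvA12 ivs curr res s).2.2) := by
  have hd1 := pvDrop_after ivs curr (fun iv => decide (iv.getD 1 0 < s))
  simp only [pvA12, pvB12, pvSplit_eq, pvPh1_eq]
  rcases hdw1 : (ivs.drop curr).dropWhile (fun iv => decide (iv.getD 1 0 < s)) with _ | ⟨iv, rest⟩
  · rw [hdw1] at hd1
    simp only [hdw1]
    rw [pvPh2_nil _ _ _ _ hd1]
    refine ⟨?_, hinv, fun hr => pvInv_append hr (pvInv_takeWhile ivs curr _ hinv)⟩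
    simp only [List.getD_eq_getElem?_getD] at hd1
    simp [hd1]
  · rw [hdw1] at hd1
    have hmem : iv ∈ ivs := by
      have h0 : iv ∈ (ivs.drop curr).dropWhile (fun iv => decide (iv.getD 1 0 < s)) := by
        rw [hdw1]; exact List.mem_cons_self
      exact List.drop_subset _ _ (pvMem_dropWhile _ _ _ h0)
    have hlen : 2 ≤ iv.length := hinv iv hmem
    have hne : iv ≠ [] := by intro hh; rw [hh] at hlen; simp at hlen
    obtain ⟨hc1, -⟩ := pvHead_drop _ _ _ _ hd1
    simp only [hdw1]
    rw [pvPh2_eq _ _ _ _ iv rest hd1 hne]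
    by_cases hlt : iv.getD 0 0 < s
    · rw [if_pos hlt, if_pos hlt]
      have hd2 : (ivs.set (curr + ((ivs.drop curr).takeWhile (fun iv => decide (iv.getD 1 0 < s))).length) ([s] ++ iv.drop 1)).drop
          (curr + ((ivs.drop curr).takeWhile (fun iv => decide (iv.getD 1 0 < s))).length) = ([s] ++ iv.drop 1) :: rest := by
        rw [pvDrop_set _ _ _ hc1]
        have := congrArg List.tail hd1
        simp only [List.tail_drop, List.tail_cons] at this
        rw [this]
      refine ⟨congrArg₂ Prod.mk rfl hd2.symm, ?_, ?_⟩
      · intro y hy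
        rcases List.mem_or_eq_of_mem_set hy with hy | rfl
        · exact hinv y hy
        · simp
          omega
      · intro hr
        refine pvInv_append (pvInv_append hr (pvInv_takeWhile ivs curr _ hinv)) ?_
        intro y hy
        simp only [List.mem_singleton] at hy
        simp [hy]
    · rw [if_neg hlt, if_neg hlt]
      exact ⟨congrArg₂ Prod.mk rfl hd1.symm, hinv,
        fun hr => pvInv_append hr (pvInv_takeWhile ivs curr _ hinv)⟩

theorem pv34_sim (ivs : List (List Int)) (c : Nat) (r : List (List Int)) (e v : Int)
    (hinv : pvInv ivs) :
    pvB34 (r, ivs.drop c) e v =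
      ((pvA34 ivs c r e v).2.2, (pvA34 ivs c r e v).1.drop (pvA34 ivs c r e v).2.1) ∧
    pvInv (pvA34 ivs c r e v).1 ∧ (pvInv r → pvInv (pvA34 ivs c r e v).2.2) := by
  have hd1 := pvDrop_after ivs c (fun iv => decide (iv.getD 1 0 ≤ e))
  simp only [pvA34, pvB34, pvSplit_eq, pvPh3_eq]
  rcases hdw1 : (ivs.drop c).dropWhile (fun iv => decide (iv.getD 1 0 ≤ e)) with _ | ⟨iv, rest⟩
  · rw [hdw1] at hd1
    simp only [hdw1]
    rw [pvPh4_nil _ _ _ _ _ hd1]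
    refine ⟨?_, hinv, fun hr => pvInv_append hr (fun y hy => ?_)⟩
    · simp only [List.getD_eq_getElem?_getD] at hd1
      simp [hd1]
    · obtain ⟨z, hz, rfl⟩ := List.mem_map.mp hy
      simp
  · rw [hdw1] at hd1
    have hmem : iv ∈ ivs := by
      have h0 : iv ∈ (ivs.drop c).dropWhile (fun iv => decide (iv.getD 1 0 ≤ e)) := by
        rw [hdw1]; exact List.mem_cons_self
      exact List.drop_subset _ _ (pvMem_dropWhile _ _ _ h0)
    have hlen : 2 ≤ iv.length := hinv iv hmem
    have hne : iv ≠ [] := by intro hh; rw [hh] at hlen; simp at hlen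
    obtain ⟨hc1, -⟩ := pvHead_drop _ _ _ _ hd1
    simp only [hdw1]
    rw [pvPh4_eq _ _ _ _ _ iv rest hd1 hne]
    by_cases hle : iv.getD 0 0 ≤ e
    · rw [if_pos hle, if_pos hle]
      have hd2 : (ivs.set (c + ((ivs.drop c).takeWhile (fun iv => decide (iv.getD 1 0 ≤ e))).length) ([e + 1] ++ iv.drop 1)).drop
          (c + ((ivs.drop c).takeWhile (fun iv => decide (iv.getD 1 0 ≤ e))).length) = ([e + 1] ++ iv.drop 1) :: rest := by
        rw [pvDrop_set _ _ _ hc1]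
        have := congrArg List.tail hd1
        simp only [List.tail_drop, List.tail_cons] at this
        rw [this]
      refine ⟨congrArg₂ Prod.mk rfl hd2.symm, ?_, ?_⟩
      · intro y hy
        rcases List.mem_or_eq_of_mem_set hy with hy | rfl
        · exact hinv y hy
        · simp
          omega
      · intro hr
        refine pvInv_append (pvInv_append hr (fun y hy => ?_)) (fun y hy => ?_)
        · obtain ⟨z, hz, rfl⟩ := List.mem_map.mp hy
          simp
        · simp only [List.mem_singleton] at hy
          simp [hy]
    · rw [if_neg hle, if_neg hle]
      refine ⟨congrArg₂ Prod.mk rfl hd1.symm, hinv, fun hr => pvInv_append hr (fun y hy => ?_)⟩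
      obtain ⟨z, hz, rfl⟩ := List.mem_map.mp hy
      simp

theorem pvStep_sim (ivs : List (List Int)) (curr : Nat) (res : List (List Int))
    (s e v : Int) (hinv : pvInv ivs) :
    pvStepB (res, ivs.drop curr) (s, e, v) =
      ((pvStepA (ivs, curr, res) (s, e, v)).2.2,
       (pvStepA (ivs, curr, res) (s, e, v)).1.drop (pvStepA (ivs, curr, res) (s, e, v)).2.1) ∧
    pvInv (pvStepA (ivs, curr, res) (s, e, v)).1 ∧
    (pvInv res → pvInv (pvStepA (ivs, curr, res) (s, e, v)).2.2) := by
  obtain ⟨h12, hinv2, hres2⟩ := pv12_sim ivs curr res s hinv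
  obtain ⟨h34, hinv4, hres4⟩ := pv34_sim (pvA12 ivs curr res s).1 (pvA12 ivs curr res s).2.1
    (pvA12 ivs curr res s).2.2 e v hinv2
  rw [pvStepB_decomp, pvStepA_decomp, h12, h34]
  exact ⟨rfl, hinv4, fun hr => hres4 (hres2 hr)⟩

theorem pvFoldAB (stage : List (Int × Int × Int)) :
    ∀ (ivs : List (List Int)) (curr : Nat) (res : List (List Int)), pvInv ivs → pvInv res →
    stage.foldl pvStepB (res, ivs.drop curr) =
      ((stage.foldl pvStepA (ivs, curr, res)).2.2,
       (stage.foldl pvStepA (ivs, curr, res)).1.drop (stage.foldl pvStepA (ivs, curr, res)).2.1) ∧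
    pvInv (stage.foldl pvStepA (ivs, curr, res)).1 ∧
    pvInv (stage.foldl pvStepA (ivs, curr, res)).2.2 := by
  induction stage with
  | nil => exact fun ivs curr res hinv hres => ⟨rfl, hinv, hres⟩
  | cons r0 rest ih =>
    intro ivs curr res hinv hres
    obtain ⟨s, e, v⟩ := r0
    obtain ⟨hB, hinv', hres'⟩ := pvStep_sim ivs curr res s e v hinv
    rcases hA : pvStepA (ivs, curr, res) (s, e, v) with ⟨i2, c2, r2⟩
    rw [hA] at hB hinv' hres'
    simp only [List.foldl_cons, hB, hA]
    exact ih i2 c2 r2 hinv' (hres' hres)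

theorem pvStage_sim (ivs : List (List Int)) (stage : List (Int × Int × Int)) (hinv : pvInv ivs) :
    pvTransformB ivs stage = pvStageA ivs stage ∧ pvInv (pvStageA ivs stage) := by
  obtain ⟨hB, hinv', hres'⟩ := pvFoldAB stage ivs 0 [] hinv (by intro y hy; simp at hy)
  rw [List.drop_zero] at hB
  unfold pvTransformB pvStageA
  rw [hB, pvLeft_eq]
  exact ⟨rfl, pvInv_append hres' (fun y hy => hinv' y (List.drop_subset _ _ hy))⟩

theorem pvB12_len (out pend : List (List Int)) (s : Int) :
    out.length + pend.length ≤ (pvB12 (out, pend) s).1.length + (pvB12 (out, pend) s).2.length := by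
  have hlen : (pend.takeWhile (fun iv => decide (iv.getD 1 0 < s))).length +
      (pend.dropWhile (fun iv => decide (iv.getD 1 0 < s))).length = pend.length := by
    rw [← List.length_append, List.takeWhile_append_dropWhile]
  simp only [pvB12, pvSplit_eq]
  split
  · next iv rest hdw =>
      rw [hdw] at hlen
      split <;> simp at hlen ⊢ <;> omega
  · next hdw =>
      rw [hdw] at hlen
      simp at hlen ⊢
      omega

theorem pvB34_len (out pend : List (List Int)) (e v : Int) :
    out.length + pend.length ≤ (pvB34 (out, pend) e v).1.length + (pvB34 (out, pend) e v).2.length := by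
  have hlen : (pend.takeWhile (fun iv => decide (iv.getD 1 0 ≤ e))).length +
      (pend.dropWhile (fun iv => decide (iv.getD 1 0 ≤ e))).length = pend.length := by
    rw [← List.length_append, List.takeWhile_append_dropWhile]
  simp only [pvB34, pvSplit_eq]
  split
  · next iv rest hdw =>
      rw [hdw] at hlen
      split <;> simp at hlen ⊢ <;> omega
  · next hdw =>
      rw [hdw] at hlen
      simp at hlen ⊢
      omega

theorem pvTransformB_ne (ivs : List (List Int)) (stage : List (Int × Int × Int))
    (h : ivs ≠ []) : pvTransformB ivs stage ≠ [] := by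
  have main : ∀ (sts : List (Int × Int × Int)) (st : List (List Int) × List (List Int)),
      st.1.length + st.2.length ≤ (sts.foldl pvStepB st).1.length + (sts.foldl pvStepB st).2.length := by
    intro sts
    induction sts with
    | nil => intro st; exact le_refl _
    | cons r rest ih =>
      intro st
      obtain ⟨s, e, v⟩ := r
      refine le_trans ?_ (ih (pvStepB st (s, e, v)))
      obtain ⟨out, pend⟩ := st
      rw [pvStepB_decomp]
      refine le_trans (pvB12_len out pend s) ?_
      rcases h12 : pvB12 (out, pend) s with ⟨out2, pend2⟩
      exact pvB34_len out2 pend2 e v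
  intro hc
  have h1 := main stage ([], ivs)
  unfold pvTransformB at hc
  have h2 : (stage.foldl pvStepB ([], ivs)).1.length + (stage.foldl pvStepB ([], ivs)).2.length = 0 := by
    rw [← List.length_append, hc]
    simp
  have h3 : 0 < ivs.length := List.length_pos_of_ne_nil h
  simp at h1
  omega

theorem pvMergeFold (t : List (List Int)) :
    ∀ (res : List (List Int)) (curr : List Int),
    t.foldl pvMergeStepB (res ++ [curr]) =
      (t.foldl pvMergeStepA (res, curr)).1 ++ [(t.foldl pvMergeStepA (res, curr)).2] := by
  induction t with
  | nil => intro res curr; rfl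
  | cons nxt rest ih =>
    intro res curr
    simp only [List.foldl_cons, pvMergeStepA, pvMergeStepB, List.getLastD_concat,
      List.dropLast_concat]
    by_cases hc : nxt.getD 0 0 ≤ curr.getD 1 0 + 1
    · rw [if_pos hc, if_pos hc]
      exact ih res (curr.set 1 (max (curr.getD 1 0) (nxt.getD 1 0)))
    · rw [if_neg hc, if_neg hc]
      exact ih (res ++ [curr]) nxt

theorem pvMerge_eq (xs : List (List Int)) (h : xs ≠ []) : pvMergeA xs = pvMergeB xs := by
  unfold pvMergeA pvMergeB
  rcases hs : PySem.List.sorted xs (fun x => x) false with _ | ⟨h0, t⟩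
  · have hp := PySem.List.sorted_perm xs (fun x => x) false
    rw [hs] at hp
    exact absurd hp.symm.eq_nil h
  · dsimp only
    rw [PySem.List.foldl_pyRange_pyGetD (h0 :: t) [] pvMergeStepA _ (by omega : (0:Int) ≤ 1)]
    have hmf := pvMergeFold t [] h0
    simp only [List.nil_append] at hmf
    simp [hmf]

theorem pvMergeB_fold_inv (t : List (List Int)) :
    ∀ merged : List (List Int), pvInv merged → merged ≠ [] → pvInv t → 
    pvInv (t.foldl pvMergeStepB merged) ∧ t.foldl pvMergeStepB merged ≠ [] := by
  induction t with
  | nil => exact fun merged hm hne _ => ⟨hm, hne⟩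
  | cons nxt rest ih =>
    intro merged hm hne ht
    simp only [List.foldl_cons]
    have hnxt : 2 ≤ nxt.length := ht nxt List.mem_cons_self
    have hrest : pvInv rest := fun y hy => ht y (List.mem_cons_of_mem _ hy)
    have hlast : merged.getLastD [] ∈ merged := by
      rcases hl : merged.getLast? with _ | y
      · rw [List.getLast?_eq_none_iff] at hl; exact absurd hl hne
      · rw [List.getLastD_eq_getLast?, hl]
        exact List.mem_of_getLast? hl
    unfold pvMergeStepB
    by_cases hc : nxt.getD 0 0 ≤ (merged.getLastD []).getD 1 0 + 1
    · rw [if_pos hc]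
      refine ih _ (pvInv_append (fun y hy => hm y (List.dropLast_subset _ hy)) ?_) (by simp) hrest
      intro y hy
      simp only [List.mem_singleton] at hy
      subst hy
      rw [List.length_set]
      exact hm _ hlast
    · rw [if_neg hc]
      refine ih _ (pvInv_append hm ?_) (by simp) hrest
      intro y hy
      simp only [List.mem_singleton] at hy
      subst hy
      exact hnxt

theorem pvMergeB_inv (xs : List (List Int)) (hinv : pvInv xs) (h : xs ≠ []) :
    pvInv (pvMergeB xs) ∧ pvMergeB xs ≠ [] := by
  unfold pvMergeB
  rcases hs : PySem.List.sorted xs (fun x => x) false with _ | ⟨h0, t⟩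
  · have hp := PySem.List.sorted_perm xs (fun x => x) false
    rw [hs] at hp
    exact absurd hp.symm.eq_nil h
  · have hsub : ∀ y ∈ h0 :: t, y ∈ xs := by
      intro y hy
      rw [← hs] at hy
      exact (PySem.List.mem_sorted _ _ _ _).mp hy
    refine pvMergeB_fold_inv t [h0] ?_ (by simp) ?_
    · intro y hy
      simp only [List.mem_singleton] at hy
      rw [hy]
      exact hinv _ (hsub _ List.mem_cons_self)
    · exact fun y hy => hinv y (hsub y (List.mem_cons_of_mem _ hy))

theorem pvStages_eq : ∀ (sts : List (List (Int × Int × Int))) (ivs : List (List Int)),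
    pvInv ivs → ivs ≠ [] →
    sts.foldl (fun ivs stage => pvMergeA (pvStageA ivs stage)) ivs =
    sts.foldl (fun ivs stage => pvMergeB (pvTransformB ivs stage)) ivs := by
  intro sts
  induction sts with
  | nil => intros; rfl
  | cons stage rest ih =>
    intro ivs hinv hne
    obtain ⟨hstage, hinvA⟩ := pvStage_sim ivs stage hinv
    have htne : pvTransformB ivs stage ≠ [] := pvTransformB_ne ivs stage hne
    have hinvT : pvInv (pvTransformB ivs stage) := hstage ▸ hinvA
    obtain ⟨hinvM, hneM⟩ := pvMergeB_inv (pvTransformB ivs stage) hinvT htne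
    simp only [List.foldl_cons]
    rw [← hstage, pvMerge_eq _ htne]
    exact ih (pvMergeB (pvTransformB ivs stage)) hinvM hneM

theorem pvMain (intervals : List (List Int)) (stages : List (List (Int × Int × Int)))
    (hpre : (intervals ≠ [] ∧ ∀ iv ∈ intervals, 2 ≤ iv.length) ∨ (stages = [] ∧ intervals.getD 0 [] ≠ [])) :
    getMinLocationInterval intervals stages = getMinLocationInterval_alt intervals stages := by
  unfold getMinLocationInterval getMinLocationInterval_alt
  rcases hpre with ⟨hne, hinv⟩ | ⟨rfl, -⟩
  · rw [pvStages_eq stages intervals hinv hne]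
  · rfl

-- ===== VERDICT (by name: the statement is the Claim_ definition above) =====
theorem getMinLocationInterval_spec : Claim_equal_getMinLocationInterval := by
  intro intervals stages _hdom hpre
  unfold Pre_getMinLocationInterval at hpre
  unfold Spec_getMinLocationInterval
  exact pvMain intervals stages hpre
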